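-- pv_equiv track=rewrite | github.com/Sameer6305/semantica | semantica/ontology/class_inferrer.py | _check_circular_hierarchy
-- ===== SOURCE A (Python) =====
-- from typing import Any, Dict, List, Optional, Set
--
-- def _check_circular_hierarchy(classes: List[Dict[str, Any]]) -> List[str]:
--     """Check for circular inheritance."""
--     errors = []
--
--     # Build parent map
--     parent_map = {}
--     for cls in classes:
--         if "subClassOf" in cls or "parent" in cls:
--             parent = cls.get("subClassOf") or cls.get("parent")
--             if parent:
--                 parent_map[cls["name"]] = parent
--
--     # Check for cycles using DFS
--     visited = set()
--     rec_stack = set()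
--
--     def has_cycle(node: str) -> bool:
--         visited.add(node)
--         rec_stack.add(node)
--
--         if node in parent_map:
--             parent = parent_map[node]
--             if parent in rec_stack:
--                 return True
--             if parent not in visited and has_cycle(parent):
--                 return True
--
--         rec_stack.remove(node)
--         return False
--
--     for cls in classes:
--         if cls["name"] not in visited:
--             if has_cycle(cls["name"]):
--                 errors.append(f"Circular hierarchy detected involving class: {cls['name']}")
--
--     return errors
-- ===== SOURCE B (Python) =====
-- def _check_circular_hierarchy(classes):
--     """Check for circular inheritance via bounded parent-chain walks (pigeonhole) instead of DFS."""
--     errors = []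
--
--     parent_map = {}
--     for cls in classes:
--         parent = cls.get("subClassOf") or cls.get("parent")
--         if parent:
--             parent_map[cls["name"]] = parent
--
--     n = len(parent_map)
--
--     def reaches_cycle(x):
--         # A chain of n+1 steps that never leaves the map must revisit a node.
--         for _ in range(n + 1):
--             if x not in parent_map:
--                 return False
--             x = parent_map[x]
--         return True
--
--     visited = set()
--     for cls in classes:
--         name = cls["name"]
--         if name in visited:
--             continue
--         if reaches_cycle(name):
--             errors.append(f"Circular hierarchy detected involving class: {name}")
--         cur = name
--         while cur not in visited:
--             visited.add(cur)
--             if cur not in parent_map: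
--                 break
--             cur = parent_map[cur]
--     return errors
-- ===== Notes on version B (the rewrite author's own statement) =====
-- stated objective: alternative
-- what changed: A's recursive DFS with a shared rec_stack is replaced by a pigeonhole test: a class reaches a cycle iff walking its parent chain n+1 steps (n = size of the parent map) never leaves the map; a separate simple loop marks the chain visited, so no recursion stack or rec_stack set exists in B.
import Mathlib
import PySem

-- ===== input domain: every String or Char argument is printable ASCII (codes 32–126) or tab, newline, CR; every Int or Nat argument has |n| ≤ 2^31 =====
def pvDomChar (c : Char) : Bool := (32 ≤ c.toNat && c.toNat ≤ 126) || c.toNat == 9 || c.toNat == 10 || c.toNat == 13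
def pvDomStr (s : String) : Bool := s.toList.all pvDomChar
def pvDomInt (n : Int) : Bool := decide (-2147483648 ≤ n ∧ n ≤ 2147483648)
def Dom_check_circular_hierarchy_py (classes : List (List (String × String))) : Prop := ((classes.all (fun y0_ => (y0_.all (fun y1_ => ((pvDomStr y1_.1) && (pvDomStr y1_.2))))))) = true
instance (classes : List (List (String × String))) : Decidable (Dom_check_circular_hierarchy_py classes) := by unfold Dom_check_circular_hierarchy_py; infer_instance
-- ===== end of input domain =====

-- B replaces A's recursive DFS (shared rec_stack, recursion over the chain) by a pigeonhole
-- cycle test — a class reaches a cycle iff n+1 parent-chain steps never leave the map — plus a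
-- separate flat marking loop for visited; objective: alternative algorithm, no speed claim.

-- ===== PORT A =====

-- cls.get("subClassOf") or cls.get("parent")   (Python `or` on Optional[str]: "" and None are falsy)
def pvGetParent (cls : List (String × String)) : Option String :=
  match List.lookup "subClassOf" cls with
  | some s => if s ≠ "" then some s else List.lookup "parent" cls
  | none => List.lookup "parent" cls

-- A's parent-map build (with A's redundant membership guard)
def pvBuildMapA (classes : List (List (String × String))) : PySem.Dict String String :=
  classes.foldl (fun pm cls =>
    if (List.lookup "subClassOf" cls).isSome || (List.lookup "parent" cls).isSome then
      match pvGetParent cls with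
      | some p =>
        if p ≠ "" then pm.insert ((List.lookup "name" cls).getD "") p else pm
      | none => pm
    else pm) PySem.Dict.empty

-- has_cycle: returns (result, visited, rec_stack).  The fuel (#classes + 1) bounds the
-- recursion depth: every recursive call is on a node not yet in visited that was a key of
-- parent_map.  rec_stack.remove(node) only ever removes a present node; discard is exact there.
def pvHasCycleA (pm : PySem.Dict String String) :
    Nat → String → PySem.Set String → PySem.Set String →
    Bool × PySem.Set String × PySem.Set String
  | 0, _, visited, recStack => (false, visited, recStack)
  | fuel+1, node, visited, recStack =>
    let visited := PySem.Set.add visited node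
    let recStack := PySem.Set.add recStack node
    match pm.get? node with
    | some parent =>
      if PySem.Set.contains recStack parent then (true, visited, recStack)
      else if !(PySem.Set.contains visited parent) then
        let r := pvHasCycleA pm fuel parent visited recStack
        if r.1 then (true, r.2.1, r.2.2)
        else (false, r.2.1, PySem.Set.discard r.2.2 node)
      else (false, visited, PySem.Set.discard recStack node)
    | none => (false, visited, PySem.Set.discard recStack node)

-- body of A's `for cls in classes:` loop; state = (errors, visited, rec_stack)
def pvLoopA (pm : PySem.Dict String String) (fuel : Nat)
    (st : List String × PySem.Set String × PySem.Set String) (cls : List (String × String)) :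
    List String × PySem.Set String × PySem.Set String :=
  let name := (List.lookup "name" cls).getD ""   -- cls["name"]; present under Pre_ (KeyError excluded)
  if PySem.Set.contains st.2.1 name then st
  else
    let r := pvHasCycleA pm fuel name st.2.1 st.2.2
    if r.1 then (st.1 ++ ["Circular hierarchy detected involving class: " ++ name], r.2.1, r.2.2)
    else (st.1, r.2.1, r.2.2)

def check_circular_hierarchy_py (classes : List (List (String × String))) : List String :=
  (classes.foldl (pvLoopA (pvBuildMapA classes) (classes.length + 1))
    ([], PySem.Set.empty, PySem.Set.empty)).1

-- ===== PORT B =====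

-- B's parent-map build (no membership guard)
def pvBuildMapB (classes : List (List (String × String))) : PySem.Dict String String :=
  classes.foldl (fun pm cls =>
    match pvGetParent cls with
    | some p =>
      if p ≠ "" then pm.insert ((List.lookup "name" cls).getD "") p else pm
    | none => pm) PySem.Dict.empty

-- the `for _ in range(k)` body of reaches_cycle, as counted recursion over the step count
def pvReach (pm : PySem.Dict String String) : Nat → String → Bool
  | 0, _ => true
  | k+1, x =>
    match pm.get? x with
    | none => false
    | some p => pvReach pm k p

-- reaches_cycle(x): n+1 steps, n = len(parent_map)
def pvReachesCycle (pm : PySem.Dict String String) (x : String) : Bool :=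
  pvReach pm (pm.keys.length + 1) x

-- the `while cur not in visited:` marking loop; fuel (#classes + 1) bounds its iterations
-- (each completed iteration adds a fresh key of the map to visited)
def pvMark (pm : PySem.Dict String String) :
    Nat → String → PySem.Set String → PySem.Set String
  | 0, _, v => v
  | fuel+1, cur, v =>
    if PySem.Set.contains v cur then v
    else
      let v := PySem.Set.add v cur
      match pm.get? cur with
      | none => v
      | some p => pvMark pm fuel p v

-- body of B's outer loop; state = (errors, visited)
def pvLoopB (pm : PySem.Dict String String) (fuel : Nat)
    (st : List String × PySem.Set String) (cls : List (String × String)) :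
    List String × PySem.Set String :=
  let name := (List.lookup "name" cls).getD ""   -- cls["name"]; present under Pre_
  if PySem.Set.contains st.2 name then st
  else
    let errors := if pvReachesCycle pm name then
        st.1 ++ ["Circular hierarchy detected involving class: " ++ name]
      else st.1
    (errors, pvMark pm fuel name st.2)

def check_circular_hierarchy_py_alt (classes : List (List (String × String))) : List String :=
  (classes.foldl (pvLoopB (pvBuildMapB classes) (classes.length + 1))
    ([], PySem.Set.empty)).1

-- ===== PRECONDITION & SPEC =====
-- Pre_ excludes exactly the inputs where Python A raises KeyError: a class dict without a "name" key.
def Pre_check_circular_hierarchy_py (classes : List (List (String × String))) : Prop :=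
  (classes.all (fun cls => (List.lookup "name" cls).isSome)) = true
instance (classes : List (List (String × String))) : Decidable (Pre_check_circular_hierarchy_py classes) := by unfold Pre_check_circular_hierarchy_py; infer_instance

def pvWitness_check_circular_hierarchy_py : (List (List (String × String))) :=
  [[("name", "a"), ("subClassOf", "b")], [("name", "b"), ("parent", "a")], [("name", "c"), ("parent", "b")]]

def Spec_check_circular_hierarchy_py (classes : List (List (String × String))) (out : List String) : Prop := out = check_circular_hierarchy_py_alt classes
instance (classes : List (List (String × String))) (out : List String) : Decidable (Spec_check_circular_hierarchy_py classes out) := by unfold Spec_check_circular_hierarchy_py; infer_instance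

-- ===== CLAIM (what is proved, stated in full; the proofs are below) =====
def Claim_equal_check_circular_hierarchy_py : Prop := ∀ (classes : List (List (String × String))), Dom_check_circular_hierarchy_py classes → Pre_check_circular_hierarchy_py classes → Spec_check_circular_hierarchy_py classes (check_circular_hierarchy_py classes)

-- ===== LEMMAS AND PROOFS =====

-- the parent-chain iteration: follow the map k times (none = the chain left the map)
def pvIterN (pm : PySem.Dict String String) : Nat → String → Option String
  | 0, x => some x
  | k+1, x =>
    match pm.get? x with
    | none => none
    | some p => pvIterN pm k p

lemma pvReach_eq_isSome (pm : PySem.Dict String String) :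
    ∀ (k : Nat) (x : String), pvReach pm k x = (pvIterN pm k x).isSome := by
  intro k
  induction k with
  | zero => intro x; simp [pvReach, pvIterN]
  | succ k ih =>
    intro x
    simp only [pvReach, pvIterN]
    cases pm.get? x with
    | none => simp
    | some p => exact ih p

lemma pvIterN_add (pm : PySem.Dict String String) :
    ∀ (a b : Nat) (x : String),
      pvIterN pm (a + b) x = (pvIterN pm a x).bind (fun y => pvIterN pm b y) := by
  intro a
  induction a with
  | zero => intro b x; simp [pvIterN]
  | succ a ih =>
    intro b x
    have : a + 1 + b = (a + b) + 1 := by omega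
    rw [this]
    simp only [pvIterN]
    cases pm.get? x with
    | none => rfl
    | some p => exact ih b p

lemma pvIterN_isSome_of_le (pm : PySem.Dict String String) {i k : Nat} (h : i ≤ k)
    (x : String) (hk : (pvIterN pm k x).isSome) : (pvIterN pm i x).isSome := by
  have hik : k = i + (k - i) := by omega
  rw [hik, pvIterN_add] at hk
  cases hx : pvIterN pm i x with
  | none => rw [hx] at hk; simp at hk
  | some y => simp

lemma pvTotal_of_cycle (pm : PySem.Dict String String) {m : Nat} {x : String}
    (hm : 0 < m) (h : pvIterN pm m x = some x) : ∀ k, (pvIterN pm k x).isSome := by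
  intro k
  induction k using Nat.strong_induction_on with
  | _ k ih =>
    by_cases hk : k ≤ m
    · exact pvIterN_isSome_of_le pm hk x (by simp [h])
    · have hke : k = m + (k - m) := by omega
      rw [hke, pvIterN_add, h]
      simpa using ih (k - m) (by omega)

lemma pvTotal_of_reaches (pm : PySem.Dict String String) {a : Nat} {x y : String}
    (h : pvIterN pm a x = some y) (hy : ∀ k, (pvIterN pm k y).isSome) :
    ∀ k, (pvIterN pm k x).isSome := by
  intro k
  by_cases hk : k ≤ a
  · exact pvIterN_isSome_of_le pm hk x (by simp [h])
  · have hke : k = a + (k - a) := by omega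
    rw [hke, pvIterN_add, h]
    simpa using hy (k - a)

-- pigeonhole: n+1 in-map steps (n = #keys) force a repeated node, hence a cycle, hence totality
lemma pvReach_total (pm : PySem.Dict String String) (hnd : pm.keys.Nodup) (x : String)
    (h : (pvIterN pm (pm.keys.length + 1) x).isSome) : ∀ k, (pvIterN pm k x).isSome := by
  set n := pm.keys.length with hn
  have hsome : ∀ i : Fin (n + 1), (pvIterN pm i.val x).isSome := by
    intro i
    exact pvIterN_isSome_of_le pm (by omega) x h
  have hval : ∀ i : Fin (n + 1), pvIterN pm i.val x = some ((pvIterN pm i.val x).getD "") := by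
    intro i
    cases hx : pvIterN pm i.val x with
    | none => exact absurd (hx ▸ hsome i) (by simp)
    | some y => simp
  have hmem : ∀ i : Fin (n + 1), ((pvIterN pm i.val x).getD "") ∈ pm.keys := by
    intro i
    have h1 : (pvIterN pm (i.val + 1) x).isSome :=
      pvIterN_isSome_of_le pm (by omega) x h
    rw [pvIterN_add] at h1
    rw [hval i] at h1
    simp only [Option.bind_some] at h1
    rw [← PySem.Dict.contains_iff_mem_keys]
    rw [PySem.Dict.contains_eq_isSome_get?]
    cases hg : pm.get? ((pvIterN pm i.val x).getD "") with
    | none => rw [show pvIterN pm 1 ((pvIterN pm i.val x).getD "") = none by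
        simp [pvIterN, hg]] at h1; simp at h1
    | some p => simp
  let g : Fin (n + 1) → {y // y ∈ pm.keys.toFinset} :=
    fun i => ⟨(pvIterN pm i.val x).getD "", by simpa using hmem i⟩
  have hcard : Fintype.card {y // y ∈ pm.keys.toFinset} < Fintype.card (Fin (n + 1)) := by
    rw [Fintype.card_coe, List.toFinset_card_of_nodup hnd, Fintype.card_fin]
    omega
  obtain ⟨i, j, hij, hgij⟩ := Fintype.exists_ne_map_eq_of_card_lt g hcard
  have key : ∀ (a b : Fin (n + 1)), a.val < b.val → g a = g b → ∀ k, (pvIterN pm k x).isSome := by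
    intro a b hab hg k
    have hvy : pvIterN pm b.val x = some ((pvIterN pm a.val x).getD "") := by
      rw [hval b]
      have : ((pvIterN pm b.val x).getD "") = ((pvIterN pm a.val x).getD "") := by
        have := congrArg Subtype.val hg
        simpa [g] using this.symm
      rw [this]
    have hsplit : pvIterN pm (a.val + (b.val - a.val)) x = some ((pvIterN pm a.val x).getD "") := by
      rw [show a.val + (b.val - a.val) = b.val by omega]; exact hvy
    rw [pvIterN_add, hval a] at hsplit
    simp only [Option.bind_some] at hsplit
    have htot := pvTotal_of_cycle pm (m := b.val - a.val) (by omega) hsplit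
    exact pvTotal_of_reaches pm (hval a) htot k
  rcases lt_or_gt_of_ne (fun hv => hij (by exact hv)) with hlt | hgt
  · exact key i j (by exact_mod_cast hlt) hgij
  · exact key j i (by exact_mod_cast hgt) hgij.symm

lemma pvReachesCycle_total (pm : PySem.Dict String String) (hnd : pm.keys.Nodup) {x : String}
    (h : pvReachesCycle pm x = true) : ∀ k, (pvIterN pm k x).isSome := by
  apply pvReach_total pm hnd
  rw [← pvReach_eq_isSome]
  exact h

lemma pvReaches_of_get?_none (pm : PySem.Dict String String) {x : String}
    (hx : pm.get? x = none) : pvReachesCycle pm x = false := by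
  simp [pvReachesCycle, pvReach, hx]

-- stepping to the parent preserves the pigeonhole verdict
lemma pvReaches_step (pm : PySem.Dict String String) (hnd : pm.keys.Nodup) {x p : String}
    (hx : pm.get? x = some p) : pvReachesCycle pm x = pvReachesCycle pm p := by
  have hxp : pvReachesCycle pm x = pvReach pm pm.keys.length p := by
    simp [pvReachesCycle, pvReach, hx]
  by_cases hp : (pvIterN pm (pm.keys.length + 1) p).isSome
  · have h1 : pvReachesCycle pm p = true := by
      rw [pvReachesCycle, pvReach_eq_isSome]; exact hp
    have h2 : (pvIterN pm pm.keys.length p).isSome :=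
      pvIterN_isSome_of_le pm (by omega) p hp
    rw [hxp, h1, pvReach_eq_isSome]; exact h2
  · have h1 : pvReachesCycle pm p = false := by
      rw [pvReachesCycle, pvReach_eq_isSome]
      exact Bool.not_eq_true _ ▸ (by simpa using hp)
    rw [hxp, h1, pvReach_eq_isSome]
    by_cases h2 : (pvIterN pm pm.keys.length p).isSome
    · exfalso
      have hx1 : (pvIterN pm (pm.keys.length + 1) x).isSome := by
        rw [show pm.keys.length + 1 = 1 + pm.keys.length by omega, pvIterN_add]
        rw [show pvIterN pm 1 x = some p by simp [pvIterN, hx]]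
        simpa using h2
      have htot := pvReach_total pm hnd x hx1
      have := htot (pm.keys.length + 2)
      rw [show pm.keys.length + 2 = 1 + (pm.keys.length + 1) by omega, pvIterN_add] at this
      rw [show pvIterN pm 1 x = some p by simp [pvIterN, hx]] at this
      simp only [Option.bind_some] at this
      exact hp this
    · simpa using h2

lemma pvReaches_of_reaches (pm : PySem.Dict String String) (hnd : pm.keys.Nodup)
    {m : Nat} {x y : String} (h : pvIterN pm m x = some y)
    (hy : pvReachesCycle pm y = true) : pvReachesCycle pm x = true := by
  rw [pvReachesCycle, pvReach_eq_isSome]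
  exact pvTotal_of_reaches pm h (pvReachesCycle_total pm hnd hy) _

lemma pvCycle_reaches (pm : PySem.Dict String String) {m : Nat} {x : String}
    (hm : 0 < m) (h : pvIterN pm m x = some x) : pvReachesCycle pm x = true := by
  rw [pvReachesCycle, pvReach_eq_isSome]
  exact pvTotal_of_cycle pm hm h _

-- strict decrease of the unvisited-keys measure
lemma pvFilter_length_lt {α : Type} {l : List α} {P Q : α → Bool}
    (himp : ∀ x, Q x = true → P x = true) {a : α} (ha : a ∈ l)
    (hP : P a = true) (hQ : Q a = false) :
    (l.filter Q).length < (l.filter P).length := by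
  induction l with
  | nil => cases ha
  | cons b t ih =>
    have hmono : (t.filter Q).length ≤ (t.filter P).length := by
      rw [← List.countP_eq_length_filter, ← List.countP_eq_length_filter]
      exact List.countP_mono_left (fun x _ => himp x)
    rcases List.mem_cons.mp ha with hab | hat
    · subst hab
      simp only [List.filter_cons, hP, hQ]
      simpa using Nat.lt_succ_of_le hmono
    · have hlt := ih hat
      simp only [List.filter_cons]
      cases hQb : Q b
      · cases hPb : P b <;> simp <;> omega
      · rw [himp b hQb]; simpa using hlt

lemma pvMark_of_mem (pm : PySem.Dict String String) (fuel : Nat) {cur : String}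
    {v : PySem.Set String} (h : cur ∈ v) : pvMark pm fuel cur v = v := by
  cases fuel with
  | zero => rfl
  | succ fuel =>
    simp only [pvMark]
    rw [if_pos ((PySem.Set.contains_iff v cur).2 h)]

-- main correspondence: A's has_cycle vs (pigeonhole verdict, marking loop, rec_stack shape)
lemma pvHC_main (pm : PySem.Dict String String) (hnd : pm.keys.Nodup) :
    ∀ (fuel : Nat) (node : String) (v s : PySem.Set String) (path : List String),
    (∀ x, x ∈ s ↔ (x ∈ v ∧ pvReachesCycle pm x = true) ∨ x ∈ path) →
    (∀ x ∈ path, ∃ m, 0 < m ∧ pvIterN pm m x = some node) →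
    (∀ x ∈ path, x ∈ v) →
    node ∉ v →
    (pm.keys.filter (fun k => !(PySem.Set.contains v k))).length < fuel →
    (pvHasCycleA pm fuel node v s).1 = pvReachesCycle pm node ∧
    (pvHasCycleA pm fuel node v s).2.1 = pvMark pm fuel node v ∧
    (∀ x, x ∈ (pvHasCycleA pm fuel node v s).2.2 ↔
        (x ∈ (pvHasCycleA pm fuel node v s).2.1 ∧ pvReachesCycle pm x = true) ∨
        (pvReachesCycle pm node = false ∧ x ∈ path)) := by
  intro fuel
  induction fuel with
  | zero =>
    intro node v s path hs hpath hpathv hnv hfuel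
    exact absurd hfuel (Nat.not_lt_zero _)
  | succ fuel ih =>
    intro node v s path hs hpath hpathv hnv hfuel
    have hcontv : PySem.Set.contains v node = false := by
      cases hc : PySem.Set.contains v node
      · rfl
      · exact absurd ((PySem.Set.contains_iff v node).1 hc) hnv
    have hnpath : node ∉ path := fun h => hnv (hpathv node h)
    cases hget : pm.get? node with
    | none =>
      have hRnode : pvReachesCycle pm node = false := pvReaches_of_get?_none pm hget
      simp only [pvHasCycleA, pvMark, hget, hcontv, Bool.false_eq_true, if_false]
      refine ⟨hRnode.symm, by first | rfl | trivial, ?_⟩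
      intro x
      by_cases hxn : x = node
      · subst hxn
        simp [PySem.Set.mem_discard, PySem.Set.mem_add, hRnode, hnpath]
      · simp only [PySem.Set.mem_discard, PySem.Set.mem_add, hRnode,
          true_and, hxn, or_false]
        have := hs x
        tauto
    | some p =>
      have hnodekeys : node ∈ pm.keys := by
        rw [← PySem.Dict.contains_iff_mem_keys, PySem.Dict.contains_eq_isSome_get?, hget]; rfl
      have hRstep : pvReachesCycle pm node = pvReachesCycle pm p := pvReaches_step pm hnd hget
      have hiter1 : pvIterN pm 1 node = some p := by simp [pvIterN, hget]
      cases hc1 : PySem.Set.contains (PySem.Set.add s node) p with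
      | true =>
        -- cycle found: parent already on the stack (or known cyclic)
        have hRp : pvReachesCycle pm p = true := by
          rcases (PySem.Set.mem_add _ _ _).1 ((PySem.Set.contains_iff _ _).1 hc1) with hps | hpn
          · rcases (hs p).1 hps with ⟨_, hr⟩ | hpp
            · exact hr
            · obtain ⟨m, hm, hit⟩ := hpath p hpp
              have hcyc : pvIterN pm (m + 1) p = some p := by
                rw [pvIterN_add, hit]
                simpa using hiter1
              exact pvCycle_reaches pm (by omega) hcyc
          · subst hpn
            exact pvCycle_reaches pm (m := 1) (by omega) hiter1
        have hRnode : pvReachesCycle pm node = true := hRstep.trans hRp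
        have hmarkmem : p ∈ PySem.Set.add v node := by
          rcases (PySem.Set.mem_add _ _ _).1 ((PySem.Set.contains_iff _ _).1 hc1) with hps | hpn
          · rcases (hs p).1 hps with ⟨hv, _⟩ | hpp
            · exact (PySem.Set.mem_add _ _ _).2 (Or.inl hv)
            · exact (PySem.Set.mem_add _ _ _).2 (Or.inl (hpathv p hpp))
          · exact (PySem.Set.mem_add _ _ _).2 (Or.inr hpn)
        simp only [pvHasCycleA, pvMark, hget, hcontv, Bool.false_eq_true, if_false, hc1, if_true]
        refine ⟨hRnode.symm, (pvMark_of_mem pm fuel hmarkmem).symm, ?_⟩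
        intro x
        simp only [hRnode, Bool.true_eq_false, false_and, or_false, PySem.Set.mem_add]
        constructor
        · rintro (hxs | hxn)
          · rcases (hs x).1 hxs with ⟨hv, hr⟩ | hxp
            · exact ⟨Or.inl hv, hr⟩
            · obtain ⟨m, hm, hit⟩ := hpath x hxp
              exact ⟨Or.inl (hpathv x hxp), pvReaches_of_reaches pm hnd hit hRnode⟩
          · subst hxn; exact ⟨Or.inr rfl, hRnode⟩
        · rintro ⟨hv | hxn, hr⟩
          · exact Or.inl ((hs x).2 (Or.inl ⟨hv, hr⟩))
          · exact Or.inr hxn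
      | false =>
        have hpns : p ∉ PySem.Set.add s node := fun h =>
          by rw [(PySem.Set.contains_iff _ _).2 h] at hc1; cases hc1
        have hpnn : p ≠ node := fun h => hpns ((PySem.Set.mem_add _ _ _).2 (Or.inr h))
        cases hc2 : PySem.Set.contains (PySem.Set.add v node) p with
        | true =>
          -- parent already visited on an earlier, cycle-free walk
          have hpv : p ∈ v := by
            rcases (PySem.Set.mem_add _ _ _).1 ((PySem.Set.contains_iff _ _).1 hc2) with h | h
            · exact h
            · exact absurd h hpnn
          have hRp : pvReachesCycle pm p = false := by
            cases hr : pvReachesCycle pm p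
            · rfl
            · exact absurd ((hs p).2 (Or.inl ⟨hpv, hr⟩))
                (fun h => hpns ((PySem.Set.mem_add _ _ _).2 (Or.inl h)))
          have hRnode : pvReachesCycle pm node = false := hRstep.trans hRp
          have hmk : pvMark pm fuel p (PySem.Set.add v node) = PySem.Set.add v node :=
            pvMark_of_mem pm fuel ((PySem.Set.mem_add _ _ _).2 (Or.inl hpv))
          simp only [pvHasCycleA, pvMark, hget, hcontv, Bool.false_eq_true, if_false, hc1,
            hc2, Bool.not_true, hmk]
          refine ⟨hRnode.symm, by first | rfl | trivial, ?_⟩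
          intro x
          by_cases hxn : x = node
          · subst hxn
            simp [PySem.Set.mem_discard, PySem.Set.mem_add, hRnode, hnpath]
          · simp only [PySem.Set.mem_discard, PySem.Set.mem_add, hRnode, true_and, hxn,
              or_false]
            have := hs x
            tauto
        | false =>
          -- fresh parent: recurse (A) / continue the walk (B)
          have hpnv : p ∉ PySem.Set.add v node := fun h =>
            by rw [(PySem.Set.contains_iff _ _).2 h] at hc2; cases hc2
          have hs' : ∀ x, x ∈ PySem.Set.add s node ↔
              (x ∈ PySem.Set.add v node ∧ pvReachesCycle pm x = true) ∨ x ∈ node :: path := by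
            intro x
            by_cases hxn : x = node
            · subst hxn; simp [PySem.Set.mem_add]
            · simp only [PySem.Set.mem_add, List.mem_cons, hxn, or_false, false_or]
              have := hs x
              tauto
          have hpath' : ∀ x ∈ node :: path, ∃ m, 0 < m ∧ pvIterN pm m x = some p := by
            intro x hx
            rcases List.mem_cons.mp hx with hxn | hxp
            · subst hxn; exact ⟨1, by omega, hiter1⟩
            · obtain ⟨m, hm, hit⟩ := hpath x hxp
              refine ⟨m + 1, by omega, ?_⟩
              rw [pvIterN_add, hit]
              simpa using hiter1
          have hpathv' : ∀ x ∈ node :: path, x ∈ PySem.Set.add v node := by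
            intro x hx
            rcases List.mem_cons.mp hx with hxn | hxp
            · subst hxn; exact (PySem.Set.mem_add _ _ _).2 (Or.inr rfl)
            · exact (PySem.Set.mem_add _ _ _).2 (Or.inl (hpathv x hxp))
          have hfuel' : (pm.keys.filter
              (fun k => !(PySem.Set.contains (PySem.Set.add v node) k))).length < fuel := by
            have himp : ∀ x, (!(PySem.Set.contains (PySem.Set.add v node) x)) = true →
                (!(PySem.Set.contains v x)) = true := by
              intro x hx
              simp only [Bool.not_eq_true'] at hx ⊢
              cases hcx : PySem.Set.contains v x
              · rfl
              · have hmem : PySem.Set.contains (PySem.Set.add v node) x = true :=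
                  (PySem.Set.contains_iff _ _).2 ((PySem.Set.mem_add _ _ _).2
                    (Or.inl ((PySem.Set.contains_iff _ _).1 hcx)))
                rw [hmem] at hx
                cases hx
            have hPn : (!(PySem.Set.contains v node)) = true := by rw [hcontv]; rfl
            have hQn : (!(PySem.Set.contains (PySem.Set.add v node) node)) = false := by
              have hmem : PySem.Set.contains (PySem.Set.add v node) node = true :=
                (PySem.Set.contains_iff _ _).2 ((PySem.Set.mem_add _ _ _).2 (Or.inr rfl))
              rw [hmem]
              rfl
            have hlt := pvFilter_length_lt himp hnodekeys hPn hQn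
            omega
          obtain ⟨e1, e2, e3⟩ := ih p (PySem.Set.add v node) (PySem.Set.add s node)
            (node :: path) hs' hpath' hpathv' hpnv hfuel'
          simp only [pvHasCycleA, pvMark, hget, hcontv, Bool.false_eq_true, if_false, hc1,
            hc2, Bool.not_false, if_true]
          rcases hA : pvHasCycleA pm fuel p (PySem.Set.add v node) (PySem.Set.add s node)
            with ⟨b, v2, s2⟩
          rw [hA] at e1 e2 e3
          simp only at e1 e2 e3
          subst e1
          cases hRp : pvReachesCycle pm p with
          | true =>
            have hRnode : pvReachesCycle pm node = true := hRstep.trans hRp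
            simp only [reduceIte]
            refine ⟨hRnode.symm, e2, ?_⟩
            intro x
            have h3 := e3 x
            rw [hRp] at h3
            simp only [Bool.true_eq_false, false_and, or_false] at h3
            simp only [hRnode, Bool.true_eq_false, false_and, or_false]
            exact h3
          | false =>
            have hRnode : pvReachesCycle pm node = false := hRstep.trans hRp
            simp only [Bool.false_eq_true, reduceIte]
            refine ⟨hRnode.symm, e2, ?_⟩
            intro x
            have h3 := e3 x
            rw [hRp] at h3
            simp only [true_and] at h3
            by_cases hxn : x = node
            · subst hxn
              simp [PySem.Set.mem_discard, hRnode, hnpath]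
            · simp only [PySem.Set.mem_discard, hxn, ne_eq, not_false_iff, and_true, h3,
                List.mem_cons, hRnode, true_and, false_or]

-- the two outer loops produce the same error list
lemma pvLoops_eq (pm : PySem.Dict String String) (hnd : pm.keys.Nodup)
    (F : Nat) (hF : pm.keys.length < F) :
    ∀ (rest : List (List (String × String))) (errors : List String)
      (v s : PySem.Set String),
    (∀ x, x ∈ s ↔ x ∈ v ∧ pvReachesCycle pm x = true) →
    (rest.foldl (pvLoopA pm F) (errors, v, s)).1 =
      (rest.foldl (pvLoopB pm F) (errors, v)).1 := by
  intro rest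
  induction rest with
  | nil => intro errors v s hs; rfl
  | cons cls rest ih =>
    intro errors v s hs
    simp only [List.foldl_cons]
    by_cases hvn : PySem.Set.contains v ((List.lookup "name" cls).getD "") = true
    · have hmemv : (List.lookup "name" cls).getD "" ∈ v := (PySem.Set.contains_iff _ _).1 hvn
      rw [show pvLoopA pm F (errors, v, s) cls = (errors, v, s) by simp [pvLoopA, hmemv],
        show pvLoopB pm F (errors, v) cls = (errors, v) by simp [pvLoopB, hmemv]]
      exact ih errors v s hs
    · have hvn' : PySem.Set.contains v ((List.lookup "name" cls).getD "") = false := by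
        cases hcc : PySem.Set.contains v ((List.lookup "name" cls).getD "") with
        | true => exact absurd hcc hvn
        | false => rfl
      have hnmem : (List.lookup "name" cls).getD "" ∉ v :=
        fun h => hvn ((PySem.Set.contains_iff _ _).2 h)
      obtain ⟨e1, e2, e3⟩ := pvHC_main pm hnd F ((List.lookup "name" cls).getD "") v s []
        (by intro x; rw [hs x]; simp) (by intro x hx; cases hx) (by intro x hx; cases hx)
        hnmem (lt_of_le_of_lt (List.length_filter_le _ _) hF)
      rcases hA : pvHasCycleA pm F ((List.lookup "name" cls).getD "") v s with ⟨b, v2, s2⟩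
      rw [hA] at e1 e2 e3
      simp only at e1 e2 e3
      have hsn : ∀ x, x ∈ s2 ↔ x ∈ v2 ∧ pvReachesCycle pm x = true := by
        intro x; have h3 := e3 x; simpa using h3
      have hLA : pvLoopA pm F (errors, v, s) cls =
          (if b = true then
            errors ++ ["Circular hierarchy detected involving class: " ++
              (List.lookup "name" cls).getD ""]
          else errors, v2, s2) := by
        simp only [pvLoopA, hvn', Bool.false_eq_true, if_false, hA]
        cases b <;> simp
      have hLB : pvLoopB pm F (errors, v) cls =
          (if b = true then
            errors ++ ["Circular hierarchy detected involving class: " ++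
              (List.lookup "name" cls).getD ""]
          else errors, pvMark pm F ((List.lookup "name" cls).getD "") v) := by
        simp only [pvLoopB, hvn', Bool.false_eq_true, if_false, ← e1]
      rw [hLA, hLB, ← e2]
      exact ih _ v2 s2 hsn

-- the two parent-map builds agree (A's membership guard is redundant)
lemma pvBuildMap_eq (classes : List (List (String × String))) :
    pvBuildMapA classes = pvBuildMapB classes := by
  unfold pvBuildMapA pvBuildMapB
  apply List.foldl_ext
  intro pm cls _
  cases hs : List.lookup "subClassOf" cls with
  | some p => simp [pvGetParent, hs]
  | none =>
    cases hp : List.lookup "parent" cls with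
    | some q => simp [pvGetParent, hs, hp]
    | none => simp [pvGetParent, hs, hp]

lemma pvBuildMapB_nodup (classes : List (List (String × String))) :
    (pvBuildMapB classes).keys.Nodup := by
  unfold pvBuildMapB
  have h : ∀ (cs : List (List (String × String))) (d : PySem.Dict String String),
      d.keys.Nodup →
      (cs.foldl (fun pm cls =>
        match pvGetParent cls with
        | some p =>
          if p ≠ "" then pm.insert ((List.lookup "name" cls).getD "") p else pm
        | none => pm) d).keys.Nodup := by
    intro cs
    induction cs with
    | nil => intro d hd; exact hd
    | cons c t ih =>
      intro d hd
      simp only [List.foldl_cons]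
      apply ih
      cases pvGetParent c with
      | none => exact hd
      | some p =>
        by_cases hp : p ≠ ""
        · simpa [hp] using PySem.Dict.nodup_keys_insert (d := d)
            (k := (List.lookup "name" c).getD "") (v := p) hd
        · simpa [hp] using hd
  exact h classes PySem.Dict.empty (by simp [PySem.Dict.keys_empty])

lemma pvBuildMapB_size_le (classes : List (List (String × String))) :
    (pvBuildMapB classes).keys.length ≤ classes.length := by
  unfold pvBuildMapB
  have h : ∀ (cs : List (List (String × String))) (d : PySem.Dict String String),
      (cs.foldl (fun pm cls =>
        match pvGetParent cls with
        | some p =>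
          if p ≠ "" then pm.insert ((List.lookup "name" cls).getD "") p else pm
        | none => pm) d).keys.length ≤ d.keys.length + cs.length := by
    intro cs
    induction cs with
    | nil => intro d; simp
    | cons c t ih =>
      intro d
      simp only [List.foldl_cons]
      have hstep : ∀ (d' : PySem.Dict String String),
          d'.keys.length ≤ d.keys.length + 1 →
          (t.foldl (fun pm cls =>
            match pvGetParent cls with
            | some p =>
              if p ≠ "" then pm.insert ((List.lookup "name" cls).getD "") p else pm
            | none => pm) d').keys.length ≤ d.keys.length + (c :: t).length := by
        intro d' hd'
        have := ih d'
        simp only [List.length_cons]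
        omega
      apply hstep
      cases pvGetParent c with
      | none => exact Nat.le_succ _
      | some p =>
        by_cases hp : p ≠ ""
        · show (if p ≠ "" then d.insert ((List.lookup "name" c).getD "") p else d).keys.length ≤
            d.keys.length + 1
          rw [if_pos hp]
          by_cases hc : d.contains ((List.lookup "name" c).getD "") = true
          · rw [PySem.Dict.keys_insert_of_contains d p hc]; omega
          · have hc' : d.contains ((List.lookup "name" c).getD "") = false := by
              cases hcc : d.contains ((List.lookup "name" c).getD "") with
              | true => exact absurd hcc hc
              | false => rfl
            rw [PySem.Dict.keys_insert_of_not_contains d p hc']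
            simp
        · show (if p ≠ "" then d.insert ((List.lookup "name" c).getD "") p else d).keys.length ≤
            d.keys.length + 1
          rw [if_neg hp]
          exact Nat.le_succ _
  have := h classes PySem.Dict.empty
  simpa [PySem.Dict.keys_empty] using this

-- ===== VERDICT (by name: the statement is the Claim_ definition above) =====
theorem check_circular_hierarchy_py_spec : Claim_equal_check_circular_hierarchy_py := by
  intro classes _ _
  unfold Spec_check_circular_hierarchy_py
  unfold check_circular_hierarchy_py check_circular_hierarchy_py_alt
  rw [pvBuildMap_eq]
  exact pvLoops_eq _ (pvBuildMapB_nodup classes) _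
    (by have := pvBuildMapB_size_le classes; omega) classes [] _ _
    (by intro x; simp [PySem.Set.empty])
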